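-- pv_equiv track=rewrite | github.com/kruxia/sqly | sqly/schema.py | migration_requirements
-- ===== SOURCE A (Python) =====
-- def migration_requirements(data, name):
--     """generate a sequence of requirements for this migration in apply order"""
--     requires = data.get(name, {}).get('requires') or []
--     if isinstance(requires, str):
--         requires = [requires]
--     yielded = []
--     for req_name in requires:
--         for req in migration_requirements(data, req_name):
--             if req not in yielded:
--                 yield req
--                 yielded.append(req)
--         if req_name not in yielded:
--             yield req_name
--             yielded.append(req_name)
-- ===== SOURCE B (Python) =====
-- def migration_requirements(data, name):
--     """generate a sequence of requirements for this migration in apply order"""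
--     # B: separate traversal from deduplication — emit the raw dependency pre-order
--     # stream, then filter it once through a single global seen-set.
--     def expand(n):
--         requires = data.get(n, {}).get('requires') or []
--         if isinstance(requires, str):
--             requires = [requires]
--         for r in requires:
--             yield from expand(r)
--             yield r
--     seen = set()
--     for req in expand(name):
--         if req not in seen:
--             seen.add(req)
--             yield req
-- ===== Notes on version B (the rewrite author's own statement) =====
-- stated objective: simpler
-- what changed: B separates traversal from deduplication: it generates the raw dependency pre-order stream by a plain recursive expansion and filters it once through a single global seen-set, instead of A's per-recursion-level deduplication of each nested call's output against a growing yielded list.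
import Mathlib
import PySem

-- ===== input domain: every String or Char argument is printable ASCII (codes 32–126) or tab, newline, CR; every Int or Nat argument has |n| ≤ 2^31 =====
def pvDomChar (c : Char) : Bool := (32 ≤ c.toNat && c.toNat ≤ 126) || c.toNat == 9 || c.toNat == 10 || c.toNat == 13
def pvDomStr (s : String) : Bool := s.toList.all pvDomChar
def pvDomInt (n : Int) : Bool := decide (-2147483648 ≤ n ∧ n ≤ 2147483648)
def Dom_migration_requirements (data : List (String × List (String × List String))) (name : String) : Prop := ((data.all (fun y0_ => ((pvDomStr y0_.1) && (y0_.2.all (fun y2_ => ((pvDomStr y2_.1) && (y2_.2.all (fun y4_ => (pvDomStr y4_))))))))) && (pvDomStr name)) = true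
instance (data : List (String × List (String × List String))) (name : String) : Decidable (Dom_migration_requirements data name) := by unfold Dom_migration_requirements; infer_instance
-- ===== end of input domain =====

-- B separates traversal from deduplication: it yields the raw dependency pre-order stream and filters it
-- once through a single global seen-set, instead of A's per-recursion-level dedup against a growing list.

-- shared accessor: data.get(n, {}).get('requires') or []  ("or []" is the identity on a list-typed value:
-- a missing key gives [] and an empty list stays []; under the declared types 'requires' is never a str,
-- so the isinstance(requires, str) branch of both Pythons never fires)
def pvReqs (data : List (String × List (String × List String))) (n : String) : List String :=
  (PySem.Dict.get? (PySem.Dict.mk (((PySem.Dict.mk data).get? n).getD [])) "requires").getD []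

-- ===== PORT A =====
-- fuel (data.length + 1) only makes the recursion total; inside Pre_ every dependency path has at most
-- data.length + 1 nodes (its non-leaf nodes are distinct keys of data), so the fuel is never exhausted there.
def pvMigA (data : List (String × List (String × List String))) : Nat → String → List String
  | 0, _ => []
  | f + 1, name =>
    (pvReqs data name).foldl
      (fun yielded req_name =>
        let y1 := (pvMigA data f req_name).foldl
          (fun y req => if req ∈ y then y else y ++ [req]) yielded
        if req_name ∈ y1 then y1 else y1 ++ [req_name]) []

def migration_requirements (data : List (String × List (String × List String))) (name : String) : List String :=
  pvMigA data (data.length + 1) name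

-- ===== PORT B =====
def pvExpand (data : List (String × List (String × List String))) : Nat → String → List String
  | 0, _ => []
  | f + 1, n => (pvReqs data n).flatMap (fun r => pvExpand data f r ++ [r])

def migration_requirements_alt (data : List (String × List (String × List String))) (name : String) : List String :=
  ((pvExpand data (data.length + 1) name).foldl
    (fun st req => if req ∈ st.1 then st else (PySem.Set.add st.1 req, st.2 ++ [req]))
    ((PySem.Set.ofList [] : PySem.Set String), ([] : List String))).2

-- ===== PRECONDITION & SPEC =====
-- ordered-dedup accumulator: fold xs into y keeping first occurrences (used by Pre_'s closure and the proofs)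
def pvAddNew (y xs : List String) : List String :=
  xs.foldl (fun a x => if x ∈ a then a else a ++ [x]) y

def pvCloseOnce (data : List (String × List (String × List String))) (s : List String) : List String :=
  pvAddNew s (s.flatMap (pvReqs data))

def pvClosure (data : List (String × List (String × List String))) (s : List String) : List String :=
  (pvCloseOnce data)^[data.length + 1] s

-- Pre_ = exactly the inputs where the Python A returns: no 'requires' cycle is reachable from name
-- (on a reachable cycle A's unmemoized recursion never terminates — RecursionError).
def Pre_migration_requirements (data : List (String × List (String × List String))) (name : String) : Prop :=
  ∀ k ∈ pvClosure data [name], k ∉ pvClosure data (pvReqs data k)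
instance (data : List (String × List (String × List String))) (name : String) : Decidable (Pre_migration_requirements data name) := by unfold Pre_migration_requirements; infer_instance

def pvWitness_migration_requirements : (List (String × List (String × List String))) × String :=
  ([("a", [("requires", ["b", "c"])]), ("b", [("requires", ["c"])])], "a")

def Spec_migration_requirements (data : List (String × List (String × List String))) (name : String) (out : List String) : Prop := out = migration_requirements_alt data name
instance (data : List (String × List (String × List String))) (name : String) (out : List String) : Decidable (Spec_migration_requirements data name out) := by unfold Spec_migration_requirements; infer_instance

-- ===== CLAIM (what is proved, stated in full; the proofs are below) =====
def Claim_equal_migration_requirements : Prop := ∀ (data : List (String × List (String × List String))) (name : String), Dom_migration_requirements data name → Pre_migration_requirements data name → Spec_migration_requirements data name (migration_requirements data name)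

-- ===== LEMMAS AND PROOFS =====

theorem pvAddNew_append (y u v : List String) :
    pvAddNew y (u ++ v) = pvAddNew (pvAddNew y u) v := by
  simp [pvAddNew, List.foldl_append]

-- the genuinely new elements pvAddNew z xs appends after z
def pvNewOf : List String → List String → List String
  | _, [] => []
  | z, x :: xs => if x ∈ z then pvNewOf z xs else x :: pvNewOf (z ++ [x]) xs

theorem pvAddNew_eq_append_newOf : ∀ (xs z : List String), pvAddNew z xs = z ++ pvNewOf z xs
  | [], z => by simp [pvAddNew, pvNewOf]
  | x :: xs, z => by
    have hstep : pvAddNew z (x :: xs) = pvAddNew (if x ∈ z then z else z ++ [x]) xs := rfl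
    by_cases h : x ∈ z
    · rw [hstep, if_pos h, pvAddNew_eq_append_newOf xs z]
      simp [pvNewOf, h]
    · rw [hstep, if_neg h, pvAddNew_eq_append_newOf xs (z ++ [x])]
      simp [pvNewOf, h]

theorem pvAddNew_of_forall_mem : ∀ (z y : List String), (∀ x ∈ z, x ∈ y) → pvAddNew y z = y
  | [], _, _ => rfl
  | x :: z, y, h => by
    have hx : x ∈ y := h x (by simp)
    simpa [pvAddNew, hx] using
      pvAddNew_of_forall_mem z y (fun a ha => h a (by simp [ha]))

theorem pvAddNew_newOf : ∀ (xs y z : List String), (∀ x ∈ z, x ∈ y) →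
    pvAddNew y (pvNewOf z xs) = pvAddNew y xs
  | [], _, _, _ => rfl
  | x :: xs, y, z, h => by
    by_cases hz : x ∈ z
    · have hy : x ∈ y := h x hz
      simp only [pvNewOf, if_pos hz]
      rw [pvAddNew_newOf xs y z h]
      simp [pvAddNew, hy]
    · simp only [pvNewOf, if_neg hz]
      by_cases hy : x ∈ y
      · have h' : ∀ a ∈ z ++ [x], a ∈ y := by
          intro a ha; rcases List.mem_append.1 ha with ha | ha
          · exact h a ha
          · simp at ha; simpa [ha] using hy
        simp only [pvAddNew, List.foldl_cons, if_pos hy]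
        exact pvAddNew_newOf xs y (z ++ [x]) h'
      · have h' : ∀ a ∈ z ++ [x], a ∈ y ++ [x] := by
          intro a ha; rcases List.mem_append.1 ha with ha | ha
          · exact List.mem_append.2 (Or.inl (h a ha))
          · simp at ha; simp [ha]
        simp only [pvAddNew, List.foldl_cons, if_neg hy]
        exact pvAddNew_newOf xs (y ++ [x]) (z ++ [x]) h'

theorem pvAddNew_pvAddNew (xs y : List String) :
    pvAddNew y (pvAddNew [] xs) = pvAddNew y xs := by
  rw [pvAddNew_eq_append_newOf xs []]
  simpa using pvAddNew_newOf xs y [] (by simp)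

theorem pvAddNew_flatMap (g : String → List String) :
    ∀ (l : List String) (y : List String),
      l.foldl (fun y r => pvAddNew y (g r)) y = pvAddNew y (l.flatMap g)
  | [], y => by simp [pvAddNew]
  | r :: l, y => by
    simp only [List.foldl_cons, List.flatMap_cons]
    rw [pvAddNew_flatMap g l, pvAddNew_append]

theorem pvMigA_eq_addNew_expand (data : List (String × List (String × List String))) :
    ∀ (f : Nat) (n : String), pvMigA data f n = pvAddNew [] (pvExpand data f n)
  | 0, n => by simp [pvMigA, pvExpand, pvAddNew]
  | f + 1, n => by
    have hstep : ∀ (y : List String) (r : String),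
        (let y1 := (pvMigA data f r).foldl
            (fun y req => if req ∈ y then y else y ++ [req]) y
         if r ∈ y1 then y1 else y1 ++ [r])
          = pvAddNew y (pvExpand data f r ++ [r]) := by
      intro y r
      show (let y1 := pvAddNew y (pvMigA data f r)
            if r ∈ y1 then y1 else y1 ++ [r])
          = pvAddNew y (pvExpand data f r ++ [r])
      rw [pvMigA_eq_addNew_expand data f r, pvAddNew_pvAddNew, pvAddNew_append]
      simp [pvAddNew]
    show (pvReqs data n).foldl _ [] = pvAddNew [] (pvExpand data (f + 1) n)
    calc (pvReqs data n).foldl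
            (fun yielded req_name =>
              let y1 := (pvMigA data f req_name).foldl
                (fun y req => if req ∈ y then y else y ++ [req]) yielded
              if req_name ∈ y1 then y1 else y1 ++ [req_name]) []
        = (pvReqs data n).foldl
            (fun y r => pvAddNew y (pvExpand data f r ++ [r])) [] := by
          exact PySem.List.foldl_congr_mem _ _ _ _ (fun y r _ => hstep y r)
      _ = pvAddNew [] ((pvReqs data n).flatMap (fun r => pvExpand data f r ++ [r])) :=
          pvAddNew_flatMap _ _ []
      _ = pvAddNew [] (pvExpand data (f + 1) n) := rfl

theorem pvMigB_inv :
    ∀ (xs : List String) (seen out : List String), (∀ x, x ∈ seen ↔ x ∈ out) →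
      (xs.foldl
        (fun st req => if req ∈ st.1 then st else (PySem.Set.add st.1 req, st.2 ++ [req]))
        (seen, out)).2 = pvAddNew out xs
  | [], _, _, _ => rfl
  | x :: xs, seen, out, h => by
    by_cases hs : x ∈ seen
    · have ho : x ∈ out := (h x).1 hs
      simp only [List.foldl_cons, if_pos hs]
      rw [pvMigB_inv xs seen out h]
      simp [pvAddNew, ho]
    · have ho : x ∉ out := fun hx => hs ((h x).2 hx)
      simp only [List.foldl_cons, if_neg hs]
      rw [PySem.Set.add_of_not_mem hs,
        pvMigB_inv xs (seen ++ [x]) (out ++ [x])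
          (by intro a; simp [h a])]
      simp [pvAddNew, ho]

-- ===== VERDICT (by name: the statement is the Claim_ definition above) =====
theorem migration_requirements_spec : Claim_equal_migration_requirements := by
  intro data name _hDom _hPre
  unfold Spec_migration_requirements migration_requirements migration_requirements_alt
  rw [pvMigB_inv _ _ _ (by intro x; simp [PySem.Set.ofList]),
    pvMigA_eq_addNew_expand]
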